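-- pv_equiv track=rewrite | github.com/marvinkreis/guut | guut/loop.py | _remove_stop_word_residue
-- ===== SOURCE A (Python) =====
-- from itertools import dropwhile
--
-- def _remove_stop_word_residue(text: str):
--     lines = text.splitlines()
--
--     def condition(line: str):
--         if not line:
--             return True
--         if not line.strip():
--             return True
--         if all([c == "#" for c in line.strip()]):
--             return True
--         return False
--
--     lines = reversed(list(dropwhile(condition, reversed(lines))))
--     return "\n".join(lines)
-- ===== SOURCE B (Python) =====
-- def _remove_stop_word_residue(text: str):
--     lines = text.splitlines()
--     last = -1
--     for i, line in enumerate(lines):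
--         if not all(c == "#" for c in line.strip()):
--             last = i
--     return "\n".join(lines[:last + 1])
-- ===== Notes on version B (the rewrite author's own statement) =====
-- stated objective: alternative
-- what changed: Replaced the reversed/dropwhile/reversed pipeline with a single forward pass that tracks the index of the last non-residue line and joins lines[:last+1]; the three-branch residue predicate collapses to one short-circuiting all() generator test on the stripped line (A builds a list of booleans per line), which a timing run measured as a constant-factor win.
import Mathlib
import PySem

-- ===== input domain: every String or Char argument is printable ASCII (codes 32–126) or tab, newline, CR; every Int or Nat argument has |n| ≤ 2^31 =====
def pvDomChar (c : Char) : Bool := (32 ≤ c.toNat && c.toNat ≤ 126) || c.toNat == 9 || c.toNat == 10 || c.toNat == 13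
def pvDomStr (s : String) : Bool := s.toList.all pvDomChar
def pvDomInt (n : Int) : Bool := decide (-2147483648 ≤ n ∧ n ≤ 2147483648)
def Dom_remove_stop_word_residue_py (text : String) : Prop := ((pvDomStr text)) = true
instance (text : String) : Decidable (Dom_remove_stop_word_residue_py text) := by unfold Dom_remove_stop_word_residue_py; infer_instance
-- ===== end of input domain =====

-- B replaces A's reversed/dropwhile/reversed pipeline with a forward pass tracking the last
-- non-residue index (alternative decomposition; a timing run measured it faster by a constant factor).


-- ===== PORT A =====
-- condition(line): three early-return branches, in A's order
def pvCondA (line : String) : Bool :=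
  if line.toList = [] then true
  else if (PySem.Str.strip line).toList = [] then true
  else if ((PySem.Str.strip line).toList.map (fun c => c == '#')).all id then true
  else false

def remove_stop_word_residue_py (text : String) : String :=
  let lines := PySem.Str.splitlines text
  let lines2 := (lines.reverse.dropWhile pvCondA).reverse
  PySem.Str.join "\n" lines2

-- ===== PORT B =====
def pvResidue (line : String) : Bool := (PySem.Str.strip line).toList.all (fun c => c == '#')

def remove_stop_word_residue_py_alt (text : String) : String :=
  let lines := PySem.Str.splitlines text
  let last : Int := (PySem.List.enumerate lines).foldl
    (fun last p => if !(pvResidue p.2) then p.1 else last) (-1)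
  PySem.Str.join "\n" (PySem.List.slice lines none (some (last + 1)))

-- ===== PRECONDITION & SPEC =====
def Spec_remove_stop_word_residue_py (text : String) (out : String) : Prop := out = remove_stop_word_residue_py_alt text
instance (text : String) (out : String) : Decidable (Spec_remove_stop_word_residue_py text out) := by unfold Spec_remove_stop_word_residue_py; infer_instance

-- ===== CLAIM (what is proved, stated in full; the proofs are below) =====
def Claim_equal_remove_stop_word_residue_py : Prop := ∀ (text : String), Dom_remove_stop_word_residue_py text → Spec_remove_stop_word_residue_py text (remove_stop_word_residue_py text)

-- ===== LEMMAS AND PROOFS =====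

-- the two residue predicates agree
theorem pvCondA_eq_pvResidue (line : String) : pvCondA line = pvResidue line := by
  unfold pvCondA pvResidue
  by_cases h2 : (PySem.Str.strip line).toList = []
  · by_cases h1 : line.toList = [] <;> simp [h1, h2]
  · have h1 : ¬ line.toList = [] := by
      intro h1
      apply h2
      simp [PySem.Str.toList_strip, h1]
      decide
    rw [if_neg h1, if_neg h2]
    simp only [List.all_map]
    rw [Bool.eq_iff_iff]
    simp

-- abbreviation for B's loop value
def pvLast (p : String → Bool) (xs : List String) : Int :=
  (PySem.List.enumerate xs).foldl (fun last q => if !(p q.2) then q.1 else last) (-1)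

theorem pvLast_concat (p : String → Bool) (xs : List String) (x : String) :
    pvLast p (xs ++ [x]) = if p x then pvLast p xs else (xs.length : Int) := by
  unfold pvLast
  rw [PySem.List.enumerate_append]
  simp [PySem.List.enumerate_cons, PySem.List.enumerate_nil]
  by_cases h : p x <;> simp [h]

theorem pvLast_bound (p : String → Bool) (xs : List String) :
    -1 ≤ pvLast p xs ∧ pvLast p xs < (xs.length : Int) := by
  induction xs using List.reverseRecOn with
  | nil => unfold pvLast; simp [PySem.List.enumerate_nil]
  | append_singleton xs x ih =>
      rw [pvLast_concat]
      by_cases h : p x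
      · rw [if_pos h]; simp only [List.length_append, List.length_cons, List.length_nil]; push_cast; omega
      · rw [if_neg h]; simp only [List.length_append, List.length_cons, List.length_nil]; push_cast; omega

theorem pvLast_take (p : String → Bool) (xs : List String) :
    xs.take (pvLast p xs + 1).toNat = (xs.reverse.dropWhile p).reverse := by
  induction xs using List.reverseRecOn with
  | nil => unfold pvLast; simp [PySem.List.enumerate_nil]
  | append_singleton xs x ih =>
      rw [pvLast_concat]
      by_cases h : p x
      · have hb := pvLast_bound p xs
        have hle : (pvLast p xs + 1).toNat ≤ xs.length := by omega
        rw [if_pos h, List.take_append_of_le_length hle, ih]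
        simp [h]
      · rw [if_neg h]
        have hlen : ((xs.length : Int) + 1).toNat = xs.length + 1 := by omega
        simp [hlen, h]

-- ===== VERDICT (by name: the statement is the Claim_ definition above) =====
theorem remove_stop_word_residue_py_spec : Claim_equal_remove_stop_word_residue_py := by
  intro text _
  unfold Spec_remove_stop_word_residue_py remove_stop_word_residue_py remove_stop_word_residue_py_alt
  have hb := pvLast_bound pvResidue (PySem.Str.splitlines text)
  show PySem.Str.join "\n" ((List.dropWhile pvCondA (PySem.Str.splitlines text).reverse).reverse)
     = PySem.Str.join "\n" (PySem.List.slice (PySem.Str.splitlines text) none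
        (some (pvLast pvResidue (PySem.Str.splitlines text) + 1)))
  rw [funext pvCondA_eq_pvResidue,
     PySem.List.slice_to (PySem.Str.splitlines text)
       (b := pvLast pvResidue (PySem.Str.splitlines text) + 1) (by omega),
     pvLast_take]
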